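-- pv_equiv track=rewrite | github.com/bellafergo/qa-bot-demoqa | core/vanya_auth.py | is_public_path
-- ===== SOURCE A (Python) =====
-- from typing import Any, Dict, FrozenSet, Optional, Tuple
--
-- PUBLIC_PATH_PREFIXES: Tuple[str, ...] = (
--     "/health",
--     "/meta",
--     "/webhooks",
--     "/evidence",
--     "/reports",
--     "/favicon.ico",
-- )
--
-- PUBLIC_PATHS_EXACT: FrozenSet[str] = frozenset()
--
-- def is_public_path(path: str) -> bool:
--     p = path or ""
--     if p in PUBLIC_PATHS_EXACT:
--         return True
--     for prefix in PUBLIC_PATH_PREFIXES: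
--         if p == prefix or p.startswith(prefix + "/"):
--             return True
--     return False
-- ===== SOURCE B (Python) =====
-- PUBLIC_SEGMENTS = frozenset(
--     {"health", "meta", "webhooks", "evidence", "reports", "favicon.ico"}
-- )
--
-- def is_public_path(path: str) -> bool:
--     parts = (path or "").split("/")
--     return len(parts) >= 2 and parts[0] == "" and parts[1] in PUBLIC_SEGMENTS
-- ===== Notes on version B (the rewrite author's own statement) =====
-- stated objective: idiomatic
-- what changed: Replaces the loop that tests the path against each public prefix (equality or prefix-plus-slash) by a single split on slashes and one frozenset membership test on the path's first segment.
import Mathlib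
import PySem

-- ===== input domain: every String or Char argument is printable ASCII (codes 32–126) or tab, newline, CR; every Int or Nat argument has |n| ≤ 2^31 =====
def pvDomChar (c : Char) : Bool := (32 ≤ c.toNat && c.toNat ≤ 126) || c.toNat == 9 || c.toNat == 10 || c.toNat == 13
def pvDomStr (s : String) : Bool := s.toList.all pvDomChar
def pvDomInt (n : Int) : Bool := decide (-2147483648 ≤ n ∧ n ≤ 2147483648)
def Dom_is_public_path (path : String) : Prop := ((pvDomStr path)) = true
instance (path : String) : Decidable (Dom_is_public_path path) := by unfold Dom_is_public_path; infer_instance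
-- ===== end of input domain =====

-- B replaces A's prefix-scan loop by one split('/') and a set-membership test on the first path segment (idiomatic rewrite, same results).

-- ===== PORT A =====
def pvPublicPathPrefixes : List (List Char) :=
  ["/health".toList, "/meta".toList, "/webhooks".toList,
   "/evidence".toList, "/reports".toList, "/favicon.ico".toList]

def pvPublicPathsExact : List (List Char) := []

def pvScanA (p : List Char) : List (List Char) → Bool
  | [] => false
  | pre :: rest =>
      if p == pre || PySem.Chars.startswith p (pre ++ ['/']) then true
      else pvScanA p rest

def is_public_path (path : String) : Bool :=
  let p := path.toList
  if pvPublicPathsExact.contains p then true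
  else pvScanA p pvPublicPathPrefixes

-- ===== PORT B =====
def pvPublicSegments : List (List Char) :=
  ["health".toList, "meta".toList, "webhooks".toList,
   "evidence".toList, "reports".toList, "favicon.ico".toList]

def is_public_path_alt (path : String) : Bool :=
  let parts := PySem.Chars.splitOn path.toList ['/']
  match parts with
  | a :: b :: _ => a == ([] : List Char) && pvPublicSegments.contains b
  | _ => false


-- ===== PRECONDITION & SPEC =====
def Spec_is_public_path (path : String) (out : Bool) : Prop := out = is_public_path_alt path
instance (path : String) (out : Bool) : Decidable (Spec_is_public_path path out) := by unfold Spec_is_public_path; infer_instance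

-- ===== CLAIM (what is proved, stated in full; the proofs are below) =====
def Claim_equal_is_public_path : Prop := ∀ (path : String), Dom_is_public_path path → Spec_is_public_path path (is_public_path path)

-- ===== LEMMAS AND PROOFS =====

-- pvMySplit is a simple structural model of PySem.Chars.splitOn · ['/'], used only in the proofs
def pvMySplit : List Char → List (List Char)
  | [] => [[]]
  | c :: r => if c = '/' then [] :: pvMySplit r else (pvMySplit r).modifyHead (c :: ·)

theorem pvMySplit_ne_nil (r : List Char) : pvMySplit r ≠ [] := by
  induction r with
  | nil => simp [pvMySplit]
  | cons c r ih =>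
    simp only [pvMySplit]
    split
    · simp
    · cases h : pvMySplit r with
      | nil => exact absurd h ih
      | cons a t => simp [List.modifyHead]

theorem pvGo_spec : ∀ (fuel : Nat) (l cur : List Char) (acc : List (List Char)), l.length < fuel →
    PySem.Chars.splitOn.go ['/'] fuel l cur acc
      = acc.reverse ++ (pvMySplit l).modifyHead (cur.reverse ++ ·) := by
  intro fuel
  induction fuel with
  | zero => intro l cur acc h; omega
  | succ fuel ih =>
    intro l cur acc h
    cases l with
    | nil =>
      rw [PySem.Chars.splitOn.go]
      simp [pvMySplit, List.modifyHead]
      omega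
    | cons c rest =>
      rw [PySem.Chars.splitOn.go]
      by_cases hc : c = '/'
      · subst hc
        have hpre : List.isPrefixOf ['/'] ('/' :: rest) = true := by simp [List.isPrefixOf]
        simp only [hpre, if_true]
        rw [ih _ _ _ (by simpa using Nat.lt_of_succ_lt_succ h)]
        simp only [pvMySplit]
        cases hms : pvMySplit rest with
        | nil => exact absurd hms (pvMySplit_ne_nil rest)
        | cons a t => simp [hms]
      · have hpre : List.isPrefixOf ['/'] (c :: rest) = false := by
          simp [List.isPrefixOf]
          intro h'; exact absurd h'.symm hc
        simp only [hpre, Bool.false_eq_true, if_false]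
        rw [ih _ _ _ (by simpa using Nat.lt_of_succ_lt_succ h)]
        simp only [pvMySplit, hc, if_false]
        cases hms : pvMySplit rest with
        | nil => exact absurd hms (pvMySplit_ne_nil rest)
        | cons a t => simp [List.modifyHead]

theorem pv_splitOn_eq (l : List Char) : PySem.Chars.splitOn l ['/'] = pvMySplit l := by
  rw [PySem.Chars.splitOn, pvGo_spec (l.length+1) l [] [] (by omega)]
  cases hms : pvMySplit l with
  | nil => exact absurd hms (pvMySplit_ne_nil l)
  | cons a t => simp [List.modifyHead]

theorem pvMySplit_head (r : List Char) :
    ∃ t, pvMySplit r = (r.takeWhile (fun c => c != '/')) :: t := by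
  induction r with
  | nil => exact ⟨[], rfl⟩
  | cons c r ih =>
    obtain ⟨t, ht⟩ := ih
    by_cases hc : c = '/'
    · subst hc; exact ⟨pvMySplit r, by simp [pvMySplit]⟩
    · refine ⟨t, ?_⟩
      have hb : (c != '/') = true := by simp [hc]
      simp [pvMySplit, hc, ht, List.takeWhile, hb, List.modifyHead]

theorem pv_takeWhile_all (seg l : List Char) (h : ∀ c ∈ seg, c ≠ '/') :
    (seg ++ '/' :: l).takeWhile (fun c => c != '/') = seg := by
  induction seg with
  | nil => simp
  | cons a s ih =>
    have ha : (a != '/') = true := by simp [h a (by simp)]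
    simp only [List.cons_append, List.takeWhile, ha]
    simp [ih (fun c hc => h c (by simp [hc]))]

theorem pv_seg_eq (seg r : List Char) (h : ∀ c ∈ seg, c ≠ '/') :
    (('/'::r) == ('/'::seg) || PySem.Chars.startswith ('/'::r) (('/'::seg) ++ ['/']))
      = (r.takeWhile (fun c => c != '/') == seg) := by
  by_cases htw : List.takeWhile (fun c => c != '/') r = seg
  · have hrhs : (List.takeWhile (fun c => c != '/') r == seg) = true := by simp [htw]
    rw [hrhs]
    have hdecom := List.takeWhile_append_dropWhile (p := fun c => c != '/') (l := r)
    rw [htw] at hdecom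
    cases hd : r.dropWhile (fun c => c != '/') with
    | nil =>
      rw [hd, List.append_nil] at hdecom
      simp [hdecom]
    | cons d u =>
      have hdne : d = '/' := by
        have := List.head_dropWhile_not (p := fun c => c != '/') (l := r) (by rw [hd]; simp)
        simp only [hd, List.head_cons] at this
        simpa using this
      subst hdne
      rw [hd] at hdecom
      have hs : PySem.Chars.startswith ('/'::r) (('/'::seg) ++ ['/']) = true := by
        rw [PySem.Chars.startswith_iff]
        exact ⟨u, by rw [← hdecom]; simp⟩
      simp only [Bool.or_eq_true]
      exact Or.inr hs
  · have hrhs : (List.takeWhile (fun c => c != '/') r == seg) = false := by simp [htw]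
    rw [hrhs]
    simp only [Bool.or_eq_false_iff]
    constructor
    · simp only [beq_eq_false_iff_ne, ne_eq, List.cons.injEq, not_and]
      intro _ hr
      subst hr
      exact htw (List.takeWhile_eq_self_iff.mpr (by intro c hc; simp [h c hc]))
    · rcases Bool.eq_false_or_eq_true (PySem.Chars.startswith ('/'::r) (('/'::seg) ++ ['/'])) with hs | hs
      · exfalso
        obtain ⟨u, hu⟩ := (PySem.Chars.startswith_iff _ _).mp hs
        simp only [List.cons_append, List.cons.injEq, List.append_assoc] at hu
        exact htw (by rw [hu.2.symm]; simpa using pv_takeWhile_all seg u h)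
      · exact hs

theorem pvScanA_cons (p pre : List Char) (rest : List (List Char)) :
    pvScanA p (pre :: rest)
      = ((p == pre || PySem.Chars.startswith p (pre ++ ['/'])) || pvScanA p rest) := by
  simp only [pvScanA]
  split <;> simp_all

theorem pv_nohit (c : Char) (hc : c ≠ '/') (r seg : List Char) :
    ((c::r) == ('/'::seg) || PySem.Chars.startswith (c::r) (('/'::seg) ++ ['/'])) = false := by
  simp only [Bool.or_eq_false_iff]
  refine ⟨by simp [hc], ?_⟩
  rcases Bool.eq_false_or_eq_true (PySem.Chars.startswith (c::r) (('/'::seg) ++ ['/'])) with hs | hs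
  · exfalso
    obtain ⟨u, hu⟩ := (PySem.Chars.startswith_iff _ _).mp hs
    simp only [List.cons_append, List.cons.injEq] at hu
    exact hc hu.1.symm
  · exact hs

theorem pv_main (path : String) : is_public_path path = is_public_path_alt path := by
  simp only [is_public_path, is_public_path_alt, pvPublicPathsExact, List.contains_nil,
    Bool.false_eq_true, if_false, pv_splitOn_eq]
  cases hcs : path.toList with
  | nil => rfl
  | cons c r =>
    obtain ⟨t, ht⟩ := pvMySplit_head r
    rw [show pvPublicPathPrefixes
          = ['/' :: ['h','e','a','l','t','h'], '/' :: ['m','e','t','a'], '/' :: ['w','e','b','h','o','o','k','s'],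
             '/' :: ['e','v','i','d','e','n','c','e'], '/' :: ['r','e','p','o','r','t','s'], '/' :: ['f','a','v','i','c','o','n','.','i','c','o']] from rfl]
    by_cases hc : c = '/'
    · subst hc
      rw [show pvMySplit ('/' :: r) = [] :: pvMySplit r from by simp [pvMySplit], ht]
      rw [pvScanA_cons, pvScanA_cons, pvScanA_cons, pvScanA_cons, pvScanA_cons, pvScanA_cons,
        show pvScanA ('/' :: r) [] = false from rfl]
      rw [pv_seg_eq ['h','e','a','l','t','h'] r (by intro x hx; simp only [List.mem_cons, List.not_mem_nil, or_false] at hx; rcases hx with rfl|rfl|rfl|rfl|rfl|rfl <;> decide),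
        pv_seg_eq ['m','e','t','a'] r (by intro x hx; simp only [List.mem_cons, List.not_mem_nil, or_false] at hx; rcases hx with rfl|rfl|rfl|rfl <;> decide),
        pv_seg_eq ['w','e','b','h','o','o','k','s'] r (by intro x hx; simp only [List.mem_cons, List.not_mem_nil, or_false] at hx; rcases hx with rfl|rfl|rfl|rfl|rfl|rfl|rfl|rfl <;> decide),
        pv_seg_eq ['e','v','i','d','e','n','c','e'] r (by intro x hx; simp only [List.mem_cons, List.not_mem_nil, or_false] at hx; rcases hx with rfl|rfl|rfl|rfl|rfl|rfl|rfl|rfl <;> decide),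
        pv_seg_eq ['r','e','p','o','r','t','s'] r (by intro x hx; simp only [List.mem_cons, List.not_mem_nil, or_false] at hx; rcases hx with rfl|rfl|rfl|rfl|rfl|rfl|rfl <;> decide),
        pv_seg_eq ['f','a','v','i','c','o','n','.','i','c','o'] r (by intro x hx; simp only [List.mem_cons, List.not_mem_nil, or_false] at hx; rcases hx with rfl|rfl|rfl|rfl|rfl|rfl|rfl|rfl|rfl|rfl|rfl <;> decide)]
      simp [pvPublicSegments, beq_eq_decide]
    · rw [show pvMySplit (c :: r) = (pvMySplit r).modifyHead (c :: ·) from by simp [pvMySplit, hc], ht]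
      simp only [List.modifyHead]
      rw [pvScanA_cons, pvScanA_cons, pvScanA_cons, pvScanA_cons, pvScanA_cons, pvScanA_cons,
        show pvScanA (c :: r) [] = false from rfl]
      rw [pv_nohit c hc r ['h','e','a','l','t','h'],
        pv_nohit c hc r ['m','e','t','a'],
        pv_nohit c hc r ['w','e','b','h','o','o','k','s'],
        pv_nohit c hc r ['e','v','i','d','e','n','c','e'],
        pv_nohit c hc r ['r','e','p','o','r','t','s'],
        pv_nohit c hc r ['f','a','v','i','c','o','n','.','i','c','o']]
      cases t <;> simp

-- ===== VERDICT (by name: the statement is the Claim_ definition above) =====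
theorem is_public_path_spec : Claim_equal_is_public_path := by
  intro path _
  unfold Spec_is_public_path
  exact pv_main path
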